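-- pv_equiv track=rewrite | github.com/vinayaktyagi10/DevLog | devlog/analysis/compare.py | _identify_common_patterns
-- ===== SOURCE A (Python) =====
-- from typing import List, Dict
--
-- def _identify_common_patterns(examples: List[Dict]) -> List[str]:
--     """Identify patterns commonly used in examples"""
--     patterns = []
--
--     for example in examples:
--         code = example.get('code', '').lower()
--
--         # Check for common patterns
--         if 'class' in code and 'factory' in example.get('context', '').lower():
--             patterns.append('Factory Pattern')
--         if 'middleware' in code or 'decorator' in code:
--             patterns.append('Middleware/Decorator Pattern')
--         if 'try:' in code and 'except' in code:
--             patterns.append('Error Handling')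
--         if 'import logging' in code or 'logger' in code:
--             patterns.append('Logging')
--
--     # Return unique patterns
--     return list(set(patterns))
-- ===== SOURCE B (Python) =====
-- def _identify_common_patterns(examples):
--     """Identify patterns commonly used in examples (per-pattern existence scans)."""
--     def field(ex, key):
--         return ex.get(key, '').lower()
--
--     result = set()
--     if any('class' in field(e, 'code') and 'factory' in field(e, 'context') for e in examples):
--         result.add('Factory Pattern')
--     if any('middleware' in field(e, 'code') or 'decorator' in field(e, 'code') for e in examples):
--         result.add('Middleware/Decorator Pattern')
--     if any('try:' in field(e, 'code') and 'except' in field(e, 'code') for e in examples):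
--         result.add('Error Handling')
--     if any('import logging' in field(e, 'code') or 'logger' in field(e, 'code') for e in examples):
--         result.add('Logging')
--     return list(result)
-- ===== Notes on version B (the rewrite author's own statement) =====
-- stated objective: alternative
-- what changed: Replaces A's single accumulating pass (append labels per example, then dedup via list(set(...))) with four independent per-pattern existence scans (any(...) over the examples) that add each label at most once to a set.
import Mathlib
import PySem

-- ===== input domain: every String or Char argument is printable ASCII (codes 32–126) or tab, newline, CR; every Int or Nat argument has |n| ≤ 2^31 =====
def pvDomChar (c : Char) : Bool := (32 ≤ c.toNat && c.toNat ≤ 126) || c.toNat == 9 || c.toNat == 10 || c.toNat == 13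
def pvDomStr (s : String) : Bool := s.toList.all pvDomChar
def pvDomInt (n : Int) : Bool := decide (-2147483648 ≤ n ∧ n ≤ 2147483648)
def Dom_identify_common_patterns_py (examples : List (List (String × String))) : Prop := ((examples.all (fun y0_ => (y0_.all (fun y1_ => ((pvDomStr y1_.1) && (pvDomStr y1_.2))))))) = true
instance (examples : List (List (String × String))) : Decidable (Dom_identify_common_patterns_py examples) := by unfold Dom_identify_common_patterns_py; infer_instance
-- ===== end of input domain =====

-- B replaces A's single accumulating pass with four independent per-pattern existence scans; objective: alternative decomposition, same cost.
-- Python's list(set(...)) iteration order is hash-dependent and unspecified (outputs are compared as sets), so both ports render the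
-- resulting set deterministically in the fixed label order Factory, Middleware/Decorator, Error Handling, Logging.


-- ===== PORT A =====
-- loop body: per example, append each matching label to the accumulated patterns list (same branch order as A)
def pvStepA (acc : List String) (ex : List (String × String)) : List String :=
  let code := PySem.Str.lower ((PySem.Dict.mk ex).getD "code" "")
  let acc1 := if PySem.Str.isIn "class" code && PySem.Str.isIn "factory" (PySem.Str.lower ((PySem.Dict.mk ex).getD "context" "")) then acc ++ ["Factory Pattern"] else acc
  let acc2 := if PySem.Str.isIn "middleware" code || PySem.Str.isIn "decorator" code then acc1 ++ ["Middleware/Decorator Pattern"] else acc1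
  let acc3 := if PySem.Str.isIn "try:" code && PySem.Str.isIn "except" code then acc2 ++ ["Error Handling"] else acc2
  if PySem.Str.isIn "import logging" code || PySem.Str.isIn "logger" code then acc3 ++ ["Logging"] else acc3

def identify_common_patterns_py (examples : List (List (String × String))) : List String :=
  let patterns := examples.foldl pvStepA []
  -- list(set(patterns)): Python's set iteration order is unspecified, so it is rendered as the distinct labels in fixed label order
  (["Factory Pattern", "Middleware/Decorator Pattern", "Error Handling", "Logging"]).filter (fun l => patterns.contains l)

-- ===== PORT B =====
-- B-side helpers: one predicate per pattern, B does one existence scan per pattern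
def pvField (ex : List (String × String)) (key : String) : String :=
  PySem.Str.lower ((PySem.Dict.mk ex).getD key "")

def pvFactory (ex : List (String × String)) : Bool :=
  PySem.Str.isIn "class" (pvField ex "code") && PySem.Str.isIn "factory" (pvField ex "context")
def pvMiddleware (ex : List (String × String)) : Bool :=
  PySem.Str.isIn "middleware" (pvField ex "code") || PySem.Str.isIn "decorator" (pvField ex "code")
def pvErr (ex : List (String × String)) : Bool :=
  PySem.Str.isIn "try:" (pvField ex "code") && PySem.Str.isIn "except" (pvField ex "code")
def pvLog (ex : List (String × String)) : Bool :=
  PySem.Str.isIn "import logging" (pvField ex "code") || PySem.Str.isIn "logger" (pvField ex "code")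

-- the set is built by adding each present label once, in the fixed add order; list(result) is their concatenation
def identify_common_patterns_py_alt (examples : List (List (String × String))) : List String :=
  (if examples.any pvFactory then ["Factory Pattern"] else []) ++
  (if examples.any pvMiddleware then ["Middleware/Decorator Pattern"] else []) ++
  (if examples.any pvErr then ["Error Handling"] else []) ++
  (if examples.any pvLog then ["Logging"] else [])

-- ===== PRECONDITION & SPEC =====
def Spec_identify_common_patterns_py (examples : List (List (String × String))) (out : List String) : Prop := out = identify_common_patterns_py_alt examples
instance (examples : List (List (String × String))) (out : List String) : Decidable (Spec_identify_common_patterns_py examples out) := by unfold Spec_identify_common_patterns_py; infer_instance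

-- ===== CLAIM (what is proved, stated in full; the proofs are below) =====
def Claim_equal_identify_common_patterns_py : Prop := ∀ (examples : List (List (String × String))), Dom_identify_common_patterns_py examples → Spec_identify_common_patterns_py examples (identify_common_patterns_py examples)

-- ===== LEMMAS AND PROOFS =====

-- a label is in the folded patterns list iff it was in the accumulator or some example triggers its per-step append
lemma pv_step_mem (l : String) (p : List (String × String) → Bool)
    (hstep : ∀ acc ex, (l ∈ pvStepA acc ex) ↔ (l ∈ acc ∨ p ex = true)) :
    ∀ (xs : List (List (String × String))) (acc : List String),
      (l ∈ xs.foldl pvStepA acc) ↔ (l ∈ acc ∨ xs.any p = true) := by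
  intro xs
  induction xs with
  | nil => simp
  | cons x xs ih =>
    intro acc
    simp only [List.foldl_cons, List.any_cons, ih, hstep, Bool.or_eq_true]
    tauto

-- ===== VERDICT (by name: the statement is the Claim_ definition above) =====
theorem identify_common_patterns_py_spec : Claim_equal_identify_common_patterns_py := by
  intro examples _
  show _ = _
  have h1 := pv_step_mem "Factory Pattern" pvFactory
    (by intro acc ex; simp only [pvStepA, pvFactory, pvField]; split_ifs <;> simp_all) examples []
  have h2 := pv_step_mem "Middleware/Decorator Pattern" pvMiddleware
    (by intro acc ex; simp only [pvStepA, pvMiddleware, pvField]; split_ifs <;> simp_all) examples []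
  have h3 := pv_step_mem "Error Handling" pvErr
    (by intro acc ex; simp only [pvStepA, pvErr, pvField]; split_ifs <;> simp_all) examples []
  have h4 := pv_step_mem "Logging" pvLog
    (by intro acc ex; simp only [pvStepA, pvLog, pvField]; split_ifs <;> simp_all) examples []
  simp only [List.not_mem_nil, false_or] at h1 h2 h3 h4
  simp only [identify_common_patterns_py, identify_common_patterns_py_alt,
    List.filter_cons, List.filter_nil, List.contains_iff_mem, h1, h2, h3, h4]
  cases examples.any pvFactory <;> cases examples.any pvMiddleware <;>
    cases examples.any pvErr <;> cases examples.any pvLog <;> simp
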